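-- pv_equiv track=rewrite | github.com/BRML/HBP-spinnaker-cerebellum | pacman103/core/reports.py | expandRouteValue
-- ===== SOURCE A (Python) =====
-- def expandRouteValue(routeValue):
--     """
--     Convert a 32-bit route word into a string which lists the target cores and
--     links.
--     """
--     linksValue     = routeValue & 0x3F
--     processorValue = (routeValue >> 6)
--     # Convert processor targets to readable values:
--     routeString = "["
--     first = True
--     for i in range(16):
--         proc = processorValue & 0b1
--         if proc != 0:
--             if first:
--                 routeString += "%d" % i
--                 first = False
--             else:
--                 routeString += ", %d" % i
--         processorValue = processorValue >> 1
--     routeString += "] ["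
--     # Convert link targets to readable values:
--     linkLabels = {0:'E', 1:'NE', 2:'N', \
--                   3:'W', 4: 'SW', 5:'S'}
--
--     first = True
--     for i in range(6):
--         link = linksValue & 0b1
--         if link != 0:
--             if first:
--                 routeString += "%s" % linkLabels[i]
--                 first = False
--             else:
--                 routeString += ", %s" % linkLabels[i]
--         linksValue = linksValue >> 1
--     routeString += "]"
--
--     return routeString
-- ===== SOURCE B (Python) =====
-- _LINKS = ('E', 'NE', 'N', 'W', 'SW', 'S')
--
--
-- def _setBits(v):
--     """Indices of the set bits of a non-negative int, lowest first,
--     found by repeatedly clearing the lowest set bit."""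
--     out = []
--     while v:
--         rest = v & (v - 1)          # v with its lowest set bit cleared
--         out.append((v - rest).bit_length() - 1)
--         v = rest
--     return out
--
--
-- def expandRouteValue(routeValue):
--     """
--     Convert a 32-bit route word into a string which lists the target cores and
--     links.
--     """
--     procs = ', '.join(str(i) for i in _setBits((routeValue >> 6) & 0xFFFF))
--     links = ', '.join(_LINKS[i] for i in _setBits(routeValue & 0x3F))
--     return '[%s] [%s]' % (procs, links)
-- ===== Notes on version B (the rewrite author's own statement) =====
-- stated objective: alternative
-- what changed: Instead of scanning every bit position of both fields with a running string and a 'first' separator flag, B iterates only over the set bits of each masked field by repeatedly clearing the lowest set bit (rest = v & (v-1)) and recovering its index with bit_length, then joins the collected labels (tuple-indexed, not dict-looked-up) with ', '.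
import Mathlib
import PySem

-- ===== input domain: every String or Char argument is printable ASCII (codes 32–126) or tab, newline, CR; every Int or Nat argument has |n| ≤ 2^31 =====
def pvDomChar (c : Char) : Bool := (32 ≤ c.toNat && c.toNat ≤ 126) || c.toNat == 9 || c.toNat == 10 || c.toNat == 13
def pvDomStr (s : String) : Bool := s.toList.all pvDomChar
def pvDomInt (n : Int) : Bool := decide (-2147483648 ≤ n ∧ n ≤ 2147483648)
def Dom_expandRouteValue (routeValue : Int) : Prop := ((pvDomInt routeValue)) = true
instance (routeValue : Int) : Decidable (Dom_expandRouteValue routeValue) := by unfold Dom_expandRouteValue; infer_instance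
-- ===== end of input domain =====

-- B replaces A's fixed scan of every bit position with separator-flag string building by iterating only
-- over the SET bits of each masked field (clearing the lowest set bit, recovering its
-- index with bit_length) and joining the collected labels (objective: alternative).

-- ===== PORT A =====
-- the dict literal {0:'E', 1:'NE', 2:'N', 3:'W', 4:'SW', 5:'S'}
def pvLinkLabels : PySem.Dict Int String :=
  (((((PySem.Dict.empty.insert 0 "E").insert 1 "NE").insert 2 "N").insert 3 "W").insert 4 "SW").insert 5 "S"

-- the body shared by A's two loops (same statements, the appended label differs):
-- test the low bit of the carried value, append the label (with ", " unless first), shift.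
-- linkLabels[i] never misses for i in range(6), so the KeyError-free lookup is get? + getD.
def pvStepA (lab : Int → String) (st : String × Bool × Int) (i : Int) : String × Bool × Int :=
  let proc := PySem.Int.band st.2.2 1
  if proc ≠ 0 then
    if st.2.1 then (st.1 ++ lab i, false, st.2.2 >>> (1 : Nat))
    else (st.1 ++ ", " ++ lab i, false, st.2.2 >>> (1 : Nat))
  else (st.1, st.2.1, st.2.2 >>> (1 : Nat))

def expandRouteValue (routeValue : Int) : String :=
  let linksValue := PySem.Int.band routeValue 0x3F
  let processorValue := routeValue >>> (6 : Nat)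
  let routeString := "["
  let st1 := (PySem.List.pyRange 0 16 1).foldl
      (pvStepA (fun i => PySem.Int.toStr i)) (routeString, true, processorValue)
  let routeString := st1.1 ++ "] ["
  let st2 := (PySem.List.pyRange 0 6 1).foldl
      (pvStepA (fun i => (pvLinkLabels.get? i).getD "")) (routeString, true, linksValue)
  st2.1 ++ "]"

-- ===== PORT B =====
-- termination fact for the `while v:` loop (cited by decreasing_by): clearing the
-- lowest set bit strictly decreases a positive value
theorem pv_band_pred_lt (v : Int) (h : 0 < v) :
    (PySem.Int.band v (v - 1)).toNat < v.toNat := by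
  have hv : v = ((v.toNat : Nat) : Int) := (Int.toNat_of_nonneg (le_of_lt h)).symm
  have hm : 0 < v.toNat := by omega
  have h1 : v - 1 = ((v.toNat - 1 : Nat) : Int) := by omega
  rw [hv] at h1 ⊢
  rw [h1, PySem.Int.band_natCast]
  have := Nat.and_le_right (n := v.toNat) (m := v.toNat - 1)
  simp only [Int.toNat_natCast]
  omega

-- while v: rest = v & (v-1); out.append((v - rest).bit_length() - 1); v = rest
-- (the argument is a masked, hence non-negative, value at every call, so the loop
-- test `v != 0` is `0 < v`; the guard also makes the recursion total)
def pvSetBits (v : Int) : List Int :=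
  if h : 0 < v then
    let rest := PySem.Int.band v (v - 1)
    ((PySem.Int.bitLength (v - rest) : Int) - 1) :: pvSetBits rest
  else []
termination_by v.toNat
decreasing_by exact pv_band_pred_lt v h

-- the tuple _LINKS = ('E', 'NE', 'N', 'W', 'SW', 'S')
def pvLinks : List String := ["E", "NE", "N", "W", "SW", "S"]

def expandRouteValue_alt (routeValue : Int) : String :=
  let procs := PySem.Str.join ", "
      ((pvSetBits (PySem.Int.band (routeValue >>> (6 : Nat)) 0xFFFF)).map (fun i => PySem.Int.toStr i))
  let links := PySem.Str.join ", "
      ((pvSetBits (PySem.Int.band routeValue 0x3F)).map (fun i => (PySem.List.pyGet? pvLinks i).getD ""))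
  "[" ++ procs ++ "] [" ++ links ++ "]"

-- ===== PRECONDITION & SPEC =====
def Spec_expandRouteValue (routeValue : Int) (out : String) : Prop := out = expandRouteValue_alt routeValue
instance (routeValue : Int) (out : String) : Decidable (Spec_expandRouteValue routeValue out) := by unfold Spec_expandRouteValue; infer_instance

-- ===== CLAIM =====
def Claim_equal_expandRouteValue : Prop := ∀ (routeValue : Int), Dom_expandRouteValue routeValue → Spec_expandRouteValue routeValue (expandRouteValue routeValue)

-- ===== LEMMAS AND PROOFS =====

-- the labels of the set bits among bits a, a+1, …, a+n-1 of the value v carried by A's loop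
def pvSel (lab : Int → String) (a : Int) (n : Nat) (v : Int) : List String :=
  match n with
  | 0 => []
  | m + 1 => (if PySem.Int.band v 1 ≠ 0 then [lab a] else []) ++ pvSel lab (a + 1) m (v >>> (1 : Nat))

-- A's separator state machine, recursively
def pvSepFold (s : String) (first : Bool) (l : List String) : String :=
  match l with
  | [] => s
  | x :: t => if first then pvSepFold (s ++ x) false t else pvSepFold (s ++ ", " ++ x) false t

theorem pvJoin_nil : PySem.Str.join ", " [] = "" := rfl

theorem pvJoin_singleton (x : String) : PySem.Str.join ", " [x] = x := by
  apply String.toList_inj.mp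
  simp [PySem.Str.join, PySem.Chars.join, List.intercalate]

theorem pvJoin_cons_cons (x y : String) (l : List String) :
    PySem.Str.join ", " (x :: y :: l) = x ++ ", " ++ PySem.Str.join ", " (y :: l) := by
  apply String.toList_inj.mp
  simp [PySem.Str.join, PySem.Chars.join, List.intercalate]

theorem pvSepFold_false : ∀ (l : List String) (s : String),
    pvSepFold s false l = s ++ (match l with | [] => "" | _ :: _ => ", " ++ PySem.Str.join ", " l) := by
  intro l
  induction l with
  | nil => intro s; simp [pvSepFold, String.append_empty]
  | cons x t ih =>
    intro s
    simp only [pvSepFold, if_neg (by simp : ¬ (false = true))]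
    rw [ih]
    cases t with
    | nil => simp [pvJoin_singleton, String.append_assoc, String.append_empty]
    | cons y r => rw [pvJoin_cons_cons]; simp [String.append_assoc]

theorem pvSepFold_true (l : List String) (s : String) :
    pvSepFold s true l = s ++ PySem.Str.join ", " l := by
  cases l with
  | nil => simp [pvSepFold, pvJoin_nil, String.append_empty]
  | cons x t =>
    simp only [pvSepFold]
    rw [pvSepFold_false]
    cases t with
    | nil => simp [pvJoin_singleton]
    | cons y r => rw [pvJoin_cons_cons]; simp [String.append_assoc]

-- A's loop computes pvSepFold of the selected labels
theorem pvLoopA (lab : Int → String) : ∀ (n : Nat) (a : Int) (s : String) (first : Bool) (v : Int),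
    ((PySem.List.pyRange a (a + n) 1).foldl (pvStepA lab) (s, first, v)).1
      = pvSepFold s first (pvSel lab a n v) := by
  intro n
  induction n with
  | zero =>
    intro a s first v
    rw [PySem.List.pyRange_one_eq_nil (by omega)]
    simp [pvSel, pvSepFold]
  | succ m ih =>
    intro a s first v
    rw [show ((m + 1 : Nat) : Int) = (m : Int) + 1 by push_cast; ring,
        PySem.List.pyRange_one_cons (by omega : a < a + ((m : Int) + 1)),
        (by ring_nf : a + ((m : Int) + 1) = a + 1 + m)]
    simp only [List.foldl_cons, pvSel]
    by_cases hb : PySem.Int.band v 1 ≠ 0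
    · cases first with
      | true =>
        simp only [pvStepA, if_pos hb]
        rw [ih]
        simp [pvSepFold]
      | false =>
        simp only [pvStepA, if_pos hb, if_neg (by simp : ¬ (false = true))]
        rw [ih]
        simp [pvSepFold]
    · simp only [pvStepA, if_neg hb]
      rw [ih]
      simp only [List.nil_append]

-- pvSel applies lab only to a, …, a+n-1
theorem pvSel_congr (lab1 lab2 : Int → String) : ∀ (n : Nat) (a v : Int),
    (∀ i, a ≤ i → i < a + n → lab1 i = lab2 i) → pvSel lab1 a n v = pvSel lab2 a n v := by
  intro n
  induction n with
  | zero => intro a v _; rfl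
  | succ m ih =>
    intro a v h
    simp only [pvSel]
    rw [h a le_rfl (by omega), ih (a + 1) (v >>> (1 : Nat)) (fun i h1 h2 => h i (by omega) (by omega))]

-- unfolding of the lowest-set-bit loop at a positive value, over Nat
theorem pvSetBits_posN (m : Nat) (h : 0 < m) :
    pvSetBits (m : Int)
      = ((PySem.Int.bitLength ((m - (m &&& (m - 1)) : Nat) : Int) : Int) - 1)
          :: pvSetBits ((m &&& (m - 1) : Nat) : Int) := by
  rw [pvSetBits, dif_pos (by exact_mod_cast h)]
  have h1 : (m : Int) - 1 = ((m - 1 : Nat) : Int) := by omega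
  have hr : m &&& (m - 1) ≤ m - 1 := Nat.and_le_right
  rw [h1, PySem.Int.band_natCast]
  have h2 : (m : Int) - ((m &&& (m - 1) : Nat) : Int) = ((m - (m &&& (m - 1)) : Nat) : Int) := by omega
  show (((PySem.Int.bitLength ((m : Int) - ((m &&& (m - 1) : Nat) : Int)) : Nat) : Int) - 1)
        :: pvSetBits ((m &&& (m - 1) : Nat) : Int) = _
  rw [h2]

theorem pvSetBits_zero : pvSetBits 0 = [] := by rw [pvSetBits]; simp

-- bit identities over Nat used by the lowest-set-bit recursion
theorem pv_nat_and_even (a : Nat) (h : 0 < a) : (2 * a) &&& (2 * a - 1) = 2 * (a &&& (a - 1)) := by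
  apply Nat.eq_of_testBit_eq
  intro i
  cases i with
  | zero => simp [Nat.testBit_zero]
  | succ i =>
    rw [Nat.testBit_and]
    simp only [Nat.testBit_succ]
    have h1 : 2 * a / 2 = a := by omega
    have h2 : (2 * a - 1) / 2 = a - 1 := by omega
    have h3 : 2 * (a &&& (a - 1)) / 2 = a &&& (a - 1) := by omega
    rw [h1, h2, h3, Nat.testBit_and]

theorem pv_nat_and_odd (a : Nat) : (2 * a + 1) &&& (2 * a) = 2 * a := by
  apply Nat.eq_of_testBit_eq
  intro i
  cases i with
  | zero => simp [Nat.testBit_zero]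
  | succ i =>
    rw [Nat.testBit_and]
    simp only [Nat.testBit_succ]
    have h1 : (2 * a + 1) / 2 = a := by omega
    have h2 : 2 * a / 2 = a := by omega
    rw [h1, h2]
    simp

-- doubling shifts every reported index up by one
theorem pvSetBits_two_mul (a : Nat) :
    pvSetBits ((2 * a : Nat) : Int) = (pvSetBits ((a : Nat) : Int)).map (· + 1) := by
  induction a using Nat.strong_induction_on with
  | _ a ih =>
    rcases Nat.eq_zero_or_pos a with rfl | ha
    · norm_num [pvSetBits_zero]
    · have hrle : a &&& (a - 1) ≤ a - 1 := Nat.and_le_right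
      rw [pvSetBits_posN _ (by omega), pvSetBits_posN _ ha]
      rw [pv_nat_and_even a ha]
      have hsub : 2 * a - 2 * (a &&& (a - 1)) = 2 * (a - (a &&& (a - 1))) := by omega
      rw [hsub]
      have hbl : PySem.Int.bitLength ((2 * (a - (a &&& (a - 1))) : Nat) : Int)
          = PySem.Int.bitLength (((a - (a &&& (a - 1))) : Nat) : Int) + 1 := by
        rw [PySem.Int.bitLength_natCast (by omega)]
        congr 2
        omega
      rw [hbl, ih _ (by omega)]
      simp only [List.map_cons]
      congr 1
      push_cast
      ring

-- halving characterisation of the lowest-set-bit loop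
theorem pvSetBits_half (m : Nat) :
    pvSetBits ((m : Nat) : Int)
      = (if m % 2 = 1 then [(0 : Int)] else []) ++ (pvSetBits ((m / 2 : Nat) : Int)).map (· + 1) := by
  rcases Nat.eq_zero_or_pos m with rfl | hm
  · norm_num [pvSetBits_zero]
  · rcases Nat.even_or_odd m with ⟨a, rfl⟩ | ⟨a, rfl⟩
    · have h1 : a + a = 2 * a := by ring
      rw [h1] at *
      rw [pvSetBits_two_mul]
      have : 2 * a % 2 = 0 := by omega
      rw [this]
      have : 2 * a / 2 = a := by omega
      rw [this]
      simp
    · have hodd : (2 * a + 1) &&& (2 * a + 1 - 1) = 2 * a := by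
        rw [Nat.add_sub_cancel]; exact pv_nat_and_odd a
      rw [pvSetBits_posN _ (by omega)]
      rw [hodd]
      have h2 : 2 * a + 1 - 2 * a = 1 := by omega
      rw [h2]
      have hb1 : PySem.Int.bitLength ((1 : Nat) : Int) = 1 := by decide
      rw [hb1]
      have : (2 * a + 1) % 2 = 1 := by omega
      rw [this]
      have : (2 * a + 1) / 2 = a := by omega
      rw [this]
      rw [pvSetBits_two_mul]
      norm_num

-- Python's  v & (2^n - 1)  is  v mod 2^n, for every (also negative) v
theorem pv_band_mask (v : Int) (n : Nat) :
    PySem.Int.band v ((2 : Int) ^ n - 1) = PySem.Int.mod v ((2 : Int) ^ n) := by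
  have h2 : (0 : Int) < 2 ^ n := by positivity
  have hcast : ((2 : Int) ^ n) = ((2 ^ n : Nat) : Int) := by push_cast; ring
  rw [PySem.Int.mod_eq_emod_of_pos h2]
  by_cases hv : 0 ≤ v
  · rw [show v = ((v.toNat : Nat) : Int) from (Int.toNat_of_nonneg hv).symm,
        show ((2:Int)^n - 1) = ((2^n - 1 : Nat) : Int) by push_cast [Nat.one_le_two_pow]; ring,
        PySem.Int.band_natCast, Nat.and_two_pow_sub_one_eq_mod]
    rw [hcast, Int.natCast_mod]
  · have hv : v < 0 := by omega
    -- negative v: the two's-complement branch of band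
    unfold PySem.Int.band
    rw [if_neg (by omega), if_pos (by omega : (0:Int) ≤ 2^n - 1)]
    have hk : (0 : Int) ≤ -v - 1 := by omega
    have hb : ((2:Int)^n - 1).toNat = 2^n - 1 := by omega
    rw [hb]
    rw [show (-v - 1) = (((-v-1).toNat : Nat) : Int) from (Int.toNat_of_nonneg hk).symm]
    simp only [Int.toNat_natCast]
    rw [Nat.and_comm, Nat.and_two_pow_sub_one_eq_mod]
    -- residues of v and -v-1 sum to 2^n - 1
    have hmod : (-v - 1) % (2:Int)^n = (((-v-1).toNat % 2^n : Nat) : Int) := by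
      rw [show (-v - 1) = (((-v-1).toNat : Nat) : Int) from (Int.toNat_of_nonneg hk).symm, hcast,
        Int.natCast_mod]
      simp
    have hsum : v % (2:Int)^n + (-v - 1) % (2:Int)^n = 2^n - 1 := by
      have e1 := Int.emod_add_ediv v ((2:Int)^n)
      have e2 := Int.emod_add_ediv (-v - 1) ((2:Int)^n)
      have b1 : 0 ≤ v % (2:Int)^n := Int.emod_nonneg v (by omega)
      have b2 : v % (2:Int)^n < 2^n := Int.emod_lt_of_pos v h2
      have b3 : 0 ≤ (-v - 1) % (2:Int)^n := Int.emod_nonneg _ (by omega)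
      have b4 : (-v - 1) % (2:Int)^n < 2^n := Int.emod_lt_of_pos _ h2
      have hdvd : (2:Int)^n ∣ (v % (2:Int)^n + (-v - 1) % (2:Int)^n + 1) := by
        refine ⟨-(v / (2:Int)^n) - ((-v - 1) / (2:Int)^n), ?_⟩
        nlinarith [e1, e2]
      obtain ⟨c, hc⟩ := hdvd
      have hc1 : c = 1 := by nlinarith
      rw [hc1, mul_one] at hc
      omega
    have hlt : (-v-1).toNat % 2^n ≤ 2^n - 1 := by
      have := Nat.mod_lt (-v-1).toNat (show 0 < 2^n by positivity)
      omega
    omega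

-- A's n-bit scan of v reports exactly the labels of the set bits of v mod 2^n,
-- in the order B's lowest-set-bit loop finds them
theorem pvSel_eq_setBits : ∀ (n : Nat) (lab : Int → String) (a v : Int),
    pvSel lab a n v = (pvSetBits (PySem.Int.mod v ((2 : Int) ^ n))).map (fun j => lab (a + j)) := by
  intro n
  induction n with
  | zero =>
    intro lab a v
    rw [PySem.Int.mod_eq_emod_of_pos (by norm_num)]
    simp [pvSel, pvSetBits_zero]
  | succ n ih =>
    intro lab a v
    have hE : (0 : Int) < 2 ^ n := by positivity
    have h2E : ((2 : Int) ^ (n + 1)) = 2 * 2 ^ n := by rw [pow_succ]; ring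
    rw [PySem.Int.mod_eq_emod_of_pos (by positivity), h2E]
    set E := (2 : Int) ^ n with hEdef
    set u := v % (2 * E) with hudef
    have b1 : 0 ≤ u := Int.emod_nonneg v (by omega)
    have b2 : u < 2 * E := Int.emod_lt_of_pos v (by omega)
    have hk : u % 2 = v % 2 := Int.emod_emod_of_dvd v ⟨E, by ring⟩
    have hq : u + 2 * E * (v / (2 * E)) = v := Int.emod_add_mul_ediv v (2 * E)
    have hdiv : v / 2 = u / 2 + E * (v / (2 * E)) := by
      conv_lhs => rw [← hq]
      rw [show u + 2 * E * (v / (2 * E)) = u + (E * (v / (2 * E))) * 2 by ring]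
      rw [Int.add_mul_ediv_right _ _ (by norm_num : (2:Int) ≠ 0)]
    have hhalf : (v / 2) % E = u / 2 := by
      rw [hdiv, Int.add_mul_emod_self_left, Int.emod_eq_of_lt (by omega) (by omega)]
    have hsh : v >>> (1 : Nat) = v / 2 := by
      rw [Int.shiftRight_eq_div_pow]; norm_num
    have hb : PySem.Int.band v 1 = v % 2 := by
      rw [PySem.Int.band_one, PySem.Int.mod_eq_emod_of_pos (by norm_num)]
    have hu : u = ((u.toNat : Nat) : Int) := by omega
    rw [show pvSel lab a (n+1) v
        = (if PySem.Int.band v 1 ≠ 0 then [lab a] else []) ++ pvSel lab (a + 1) n (v >>> (1 : Nat))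
        from rfl]
    rw [hsh, ih lab (a + 1) (v / 2), PySem.Int.mod_eq_emod_of_pos hE, hhalf]
    rw [hu, pvSetBits_half]
    rw [show ((u.toNat / 2 : Nat) : Int) = u / 2 by omega]
    rw [List.map_append, List.map_map]
    congr 1
    · by_cases hc : v % 2 = 0
      · rw [if_neg (by rw [hb]; omega), if_neg (by omega)]
        rfl
      · rw [if_pos (by rw [hb]; omega), if_pos (by omega)]
        simp
    · rw [← hu]
      apply List.map_congr_left
      intro j _
      simp only [Function.comp]
      congr 1
      ring

-- ===== VERDICT =====
theorem expandRouteValue_spec : Claim_equal_expandRouteValue := by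
  intro w _
  unfold Spec_expandRouteValue expandRouteValue expandRouteValue_alt
  simp only []
  have h16 := pvLoopA (fun i => PySem.Int.toStr i) 16 0 "[" true (w >>> (6 : Nat))
  have h6 := fun s => pvLoopA (fun i => (pvLinkLabels.get? i).getD "") 6 0 s true (PySem.Int.band w 0x3F)
  norm_num at h16 h6
  rw [h16, h6, pvSepFold_true, pvSepFold_true]
  have hmask16 : PySem.Int.band (w >>> (6 : Nat)) 0xFFFF = PySem.Int.mod (w >>> (6 : Nat)) ((2 : Int) ^ 16) := by
    have := pv_band_mask (w >>> (6 : Nat)) 16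
    norm_num at this ⊢
    exact this
  have hmask6 : PySem.Int.band w 0x3F = PySem.Int.mod (PySem.Int.band w 0x3F) ((2 : Int) ^ 6) := by
    have h1 := pv_band_mask w 6
    norm_num at h1 ⊢
    rw [h1]
    exact (Int.emod_emod_of_dvd w dvd_rfl).symm
  have e16 := pvSel_eq_setBits 16 (fun i => PySem.Int.toStr i) 0 (w >>> (6 : Nat))
  have hlab : pvSel (fun i => (pvLinkLabels.get? i).getD "") 0 6 (PySem.Int.band w 0x3F)
      = pvSel (fun i => (PySem.List.pyGet? pvLinks i).getD "") 0 6 (PySem.Int.band w 0x3F) := by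
    apply pvSel_congr
    intro i h1 h2
    norm_num at h2
    interval_cases i <;> rfl
  have e6 := pvSel_eq_setBits 6 (fun i => (PySem.List.pyGet? pvLinks i).getD "") 0 (PySem.Int.band w 0x3F)
  rw [e16, hlab, e6, ← hmask16, ← hmask6]
  simp only [zero_add]
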